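-- pv_equiv track=rewrite | github.com/smeeuw/Volume-Calculation-of-Sand-Piles | merge_and_combine.py | find_image_size_with_overlap
-- ===== SOURCE A (Python) =====
-- from typing import Union, Tuple, Dict, List, Optional
--
-- def find_image_size_with_overlap(image_width: int, image_height: int, step_size_width: int,
--                                  step_size_height: int, patch_size_width: int, patch_size_height: int) -> Tuple[
--     int, int]:
--     """
--     Find the size of the resulting image considering that patches can overlap.
--
--     Parameters:
--         image_width (int): The width of the input image, in pixels.
--         image_height (int): The height of the input image, in pixels.
--         step_size_width (int): The step size for moving horizontally when creating patches.
--         step_size_height (int): The step size for moving vertically when creating patches.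
--         patch_size_width (int): The width of the patches, in pixels.
--         patch_size_height (int): The height of the patches, in pixels.
--
--     Returns:
--         Tuple[int, int]: The width and height of the resulting image considering that patches can overlap.
--     """
--     width = patch_size_width
--     while width < image_width:
--         width += step_size_width
--
--     height = patch_size_height
--     while height < image_height:
--         height += step_size_height
--
--     return width, height
-- ===== SOURCE B (Python) =====
-- def find_image_size_with_overlap(image_width: int, image_height: int, step_size_width: int,
--                                  step_size_height: int, patch_size_width: int, patch_size_height: int):
--     sizes = []
--     for image, step, patch in ((image_width, step_size_width, patch_size_width),
--                                (image_height, step_size_height, patch_size_height)):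
--         need = image - patch
--         if need <= 0:
--             sizes.append(patch)
--         else:
--             # smallest patch + k*step >= image via ceiling division
--             sizes.append(patch + ((need + step - 1) // step) * step)
--     return sizes[0], sizes[1]
-- ===== Notes on version B (the rewrite author's own statement) =====
-- stated objective: faster
-- what changed: Replaces the two per-dimension while-loops that add step_size until covering the image by a single pass over the two (image, step, patch) triples computing each covered size in closed form with a ceiling division (need + step - 1) // step.
import Mathlib
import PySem

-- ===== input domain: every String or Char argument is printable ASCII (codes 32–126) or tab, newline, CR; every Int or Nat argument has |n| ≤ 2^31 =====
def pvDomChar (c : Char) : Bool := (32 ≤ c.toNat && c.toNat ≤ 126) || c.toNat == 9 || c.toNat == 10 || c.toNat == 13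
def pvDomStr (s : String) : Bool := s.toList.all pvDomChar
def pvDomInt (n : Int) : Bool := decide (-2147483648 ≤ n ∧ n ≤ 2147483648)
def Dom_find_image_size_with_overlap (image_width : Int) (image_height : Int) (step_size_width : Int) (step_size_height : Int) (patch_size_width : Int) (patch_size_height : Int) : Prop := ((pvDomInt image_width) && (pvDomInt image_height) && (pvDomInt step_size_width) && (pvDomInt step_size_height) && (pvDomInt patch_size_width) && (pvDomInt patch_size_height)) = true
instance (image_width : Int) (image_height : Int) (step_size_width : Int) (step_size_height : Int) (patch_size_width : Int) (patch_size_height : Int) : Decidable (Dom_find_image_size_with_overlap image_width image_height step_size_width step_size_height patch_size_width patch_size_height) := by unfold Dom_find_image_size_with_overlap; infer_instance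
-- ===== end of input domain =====

-- B replaces A's two per-dimension while-loops by one pass over the two (image, step, patch)
-- triples computing each covered size in closed form by ceiling division; objective: faster.

-- ===== PORT A =====
-- A's 'while w < image: w += step' loop. The '0 < step' conjunct in the guard only makes the
-- recursion total: on inputs with w < image and step ≤ 0 the Python loop never terminates, and
-- such inputs are excluded by Pre_ below.
def pvWhileAdd (image : Int) (step : Int) (w : Int) : Int :=
  if _h : w < image ∧ 0 < step then pvWhileAdd image step (w + step) else w
  termination_by (image - w).toNat
  decreasing_by omega

def find_image_size_with_overlap (image_width : Int) (image_height : Int) (step_size_width : Int) (step_size_height : Int) (patch_size_width : Int) (patch_size_height : Int) : Int × Int :=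
  (pvWhileAdd image_width step_size_width patch_size_width,
   pvWhileAdd image_height step_size_height patch_size_height)

-- ===== PORT B =====
-- Source B: fold over the two (image, step, patch) triples, appending each covered size to 'sizes',
-- then return (sizes[0], sizes[1]) — the list always has exactly two elements, so getD never
-- takes its default.
def find_image_size_with_overlap_alt (image_width : Int) (image_height : Int) (step_size_width : Int) (step_size_height : Int) (patch_size_width : Int) (patch_size_height : Int) : Int × Int :=
  let sizes := [(image_width, step_size_width, patch_size_width),
                (image_height, step_size_height, patch_size_height)].foldl
    (fun acc t =>
      let need := t.1 - t.2.2
      if need ≤ 0 then acc ++ [t.2.2]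
      else acc ++ [t.2.2 + PySem.Int.floordiv (need + t.2.1 - 1) t.2.1 * t.2.1]) []
  (sizes.getD 0 0, sizes.getD 1 0)

-- ===== PRECONDITION & SPEC =====
-- Pre_ excludes exactly the inputs on which A's while-loop never terminates (Python diverges):
-- a dimension with patch < image and step ≤ 0.
def Pre_find_image_size_with_overlap (image_width : Int) (image_height : Int) (step_size_width : Int) (step_size_height : Int) (patch_size_width : Int) (patch_size_height : Int) : Prop :=
  (image_width ≤ patch_size_width ∨ 0 < step_size_width) ∧
  (image_height ≤ patch_size_height ∨ 0 < step_size_height)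
instance (image_width : Int) (image_height : Int) (step_size_width : Int) (step_size_height : Int) (patch_size_width : Int) (patch_size_height : Int) : Decidable (Pre_find_image_size_with_overlap image_width image_height step_size_width step_size_height patch_size_width patch_size_height) := by unfold Pre_find_image_size_with_overlap; infer_instance

def pvWitness_find_image_size_with_overlap : Int × Int × Int × Int × Int × Int := (10, 7, 3, 2, 4, 4)

def Spec_find_image_size_with_overlap (image_width : Int) (image_height : Int) (step_size_width : Int) (step_size_height : Int) (patch_size_width : Int) (patch_size_height : Int) (out : Int × Int) : Prop := out = find_image_size_with_overlap_alt image_width image_height step_size_width step_size_height patch_size_width patch_size_height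
instance (image_width : Int) (image_height : Int) (step_size_width : Int) (step_size_height : Int) (patch_size_width : Int) (patch_size_height : Int) (out : Int × Int) : Decidable (Spec_find_image_size_with_overlap image_width image_height step_size_width step_size_height patch_size_width patch_size_height out) := by unfold Spec_find_image_size_with_overlap; infer_instance

-- ===== CLAIM (what is proved, stated in full; the proofs are below) =====
def Claim_equal_find_image_size_with_overlap : Prop := ∀ (image_width : Int) (image_height : Int) (step_size_width : Int) (step_size_height : Int) (patch_size_width : Int) (patch_size_height : Int), Dom_find_image_size_with_overlap image_width image_height step_size_width step_size_height patch_size_width patch_size_height → Pre_find_image_size_with_overlap image_width image_height step_size_width step_size_height patch_size_width patch_size_height → Spec_find_image_size_with_overlap image_width image_height step_size_width step_size_height patch_size_width patch_size_height (find_image_size_with_overlap image_width image_height step_size_width step_size_height patch_size_width patch_size_height)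

-- ===== LEMMAS AND PROOFS =====

-- One dimension of B's fold body, as a function (proof-only helper).
def pvCoverB (image step patch : Int) : Int :=
  if image - patch ≤ 0 then patch
  else patch + PySem.Int.floordiv (image - patch + step - 1) step * step

theorem alt_eq_pair (iw ih sw sh pw ph : Int) :
    find_image_size_with_overlap_alt iw ih sw sh pw ph = (pvCoverB iw sw pw, pvCoverB ih sh ph) := by
  simp only [find_image_size_with_overlap_alt, List.foldl, pvCoverB]
  by_cases h1 : iw - pw ≤ 0 <;> by_cases h2 : ih - ph ≤ 0 <;>
    simp [h1, h2, List.getD]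

-- Stepping once preserves the closed form.
theorem pvCoverB_step (image step w : Int) (hs : 0 < step) (hw : w < image) :
    pvCoverB image step (w + step) = pvCoverB image step w := by
  have hne : ¬ image - w ≤ 0 := by omega
  by_cases h2 : image - (w + step) ≤ 0
  · -- last iteration: the ceiling is 1
    have hk : PySem.Int.floordiv (image - w + step - 1) step = 1 :=
      (PySem.Int.floordiv_eq_iff_of_pos hs).mpr (by constructor <;> nlinarith)
    simp only [pvCoverB, if_pos h2, if_neg hne, hk]
    ring
  · -- both still below image: the ceiling shifts by exactly one
    set q := PySem.Int.floordiv (image - (w + step) + step - 1) step with hq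
    have hb := (PySem.Int.floordiv_eq_iff_of_pos hs).mp hq.symm
    have hk : PySem.Int.floordiv (image - w + step - 1) step = q + 1 :=
      (PySem.Int.floordiv_eq_iff_of_pos hs).mpr (by constructor <;> nlinarith [hb.1, hb.2])
    simp only [pvCoverB, if_neg h2, if_neg hne, ← hq, hk]
    ring

theorem pvWhileAdd_eq_coverB (image step : Int) (hs : 0 < step) :
    ∀ (n : Nat) (w : Int), (image - w).toNat = n → pvWhileAdd image step w = pvCoverB image step w := by
  intro n
  induction n using Nat.strong_induction_on with
  | _ n ih =>
    intro w hn
    rw [pvWhileAdd]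
    by_cases hw : w < image
    · rw [dif_pos ⟨hw, hs⟩, ih (image - (w + step)).toNat (by omega) _ rfl,
        pvCoverB_step image step w hs hw]
    · rw [dif_neg (by omega), pvCoverB, if_pos (by omega)]

theorem pv_dim_eq (image step patch : Int) (h : image ≤ patch ∨ 0 < step) :
    pvWhileAdd image step patch = pvCoverB image step patch := by
  rcases h with h | h
  · rw [pvWhileAdd, dif_neg (by omega), pvCoverB, if_pos (by omega)]
  · exact pvWhileAdd_eq_coverB image step h _ patch rfl

-- ===== VERDICT (by name: the statement is the Claim_ definition above) =====
theorem find_image_size_with_overlap_spec : Claim_equal_find_image_size_with_overlap := by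
  intro iw ih sw sh pw ph _ hpre
  unfold Spec_find_image_size_with_overlap find_image_size_with_overlap
  rw [alt_eq_pair, pv_dim_eq iw sw pw hpre.1, pv_dim_eq ih sh ph hpre.2]
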